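-- pv_equiv track=rewrite | github.com/Cyril-44/C-Cpp | !Luogu/Luogu 冬日绘版.py | chunk_image
-- ===== SOURCE A (Python) =====
-- from typing import Optional, Tuple, List, Dict
--
-- def chunk_image(pixels: List[List[Dict]], chunk_num: int) -> List[List[List[Dict]]]:
--     """将图片分为 chunk_num 个块，大pixels的行数被均分。对于每个chunk，如果总数无法被整除，则最后一个块将多一些"""
--     if chunk_num <= 0:
--         raise ValueError("chunk_num 必须大于0")
--
--     total_rows = len(pixels)
--     if total_rows == 0:
--         return []
--
--     # 计算每个块的基础行数和余数
--     base_rows_per_chunk = total_rows // chunk_num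
--     remainder = total_rows % chunk_num
--
--     chunks = []
--     start_row = 0
--
--     for i in range(chunk_num):
--         # 前remainder个块会多分配一行
--         rows_in_this_chunk = base_rows_per_chunk + (1 if i < remainder else 0)
--         end_row = start_row + rows_in_this_chunk
--
--         # 提取当前块的像素数据
--         chunk = pixels[start_row:end_row]
--         chunks.append(chunk)
--
--         start_row = end_row
--
--     return chunks
-- ===== SOURCE B (Python) =====
-- from typing import Optional, Tuple, List, Dict
--
-- def chunk_image(pixels: List[List[Dict]], chunk_num: int) -> List[List[List[Dict]]]:
--     if chunk_num <= 0:
--         raise ValueError("chunk_num 必须大于0")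
--     if not pixels:
--         return []
--     # repeatedly peel off the first ceil(len(rest)/k) rows as the next chunk,
--     # then continue on the remaining rows with one chunk fewer
--     chunks = []
--     rest, k = pixels, chunk_num
--     while k > 0:
--         size = -(-len(rest) // k)
--         chunks.append(rest[:size])
--         rest = rest[size:]
--         k -= 1
--     return chunks
-- ===== Notes on version B (the rewrite author's own statement) =====
-- stated objective: alternative
-- what changed: Replaces A's precomputed base/remainder and the start_row index arithmetic over the original list with a peeling scheme that repeatedly splits off the first ceil(len(rest)/k) rows by ceiling division and continues on the remaining rows with k-1 chunks; correctness rests on the self-similarity of the balanced partition (the first chunk of the (n,k)-partition has ceil(n/k) rows and the rest is the (n-ceil(n/k), k-1)-partition).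
import Mathlib
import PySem

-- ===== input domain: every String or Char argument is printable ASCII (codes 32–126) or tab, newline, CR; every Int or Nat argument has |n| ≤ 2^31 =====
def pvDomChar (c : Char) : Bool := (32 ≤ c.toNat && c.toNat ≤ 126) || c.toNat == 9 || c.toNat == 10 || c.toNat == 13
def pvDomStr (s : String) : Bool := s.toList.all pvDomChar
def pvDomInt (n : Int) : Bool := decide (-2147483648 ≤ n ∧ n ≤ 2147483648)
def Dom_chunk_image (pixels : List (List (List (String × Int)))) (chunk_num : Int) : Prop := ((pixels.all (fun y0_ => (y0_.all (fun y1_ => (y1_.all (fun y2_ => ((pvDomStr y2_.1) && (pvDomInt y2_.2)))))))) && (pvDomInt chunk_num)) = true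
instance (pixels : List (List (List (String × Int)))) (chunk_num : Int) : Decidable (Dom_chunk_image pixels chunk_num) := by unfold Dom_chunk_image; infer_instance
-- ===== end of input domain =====

-- B replaces A's base/remainder loop with recursive peeling: take ceil(len/k) rows, recurse on the rest with k-1 chunks (objective: alternative).

-- ===== PORT A =====
-- literal transliteration of A: guard, base/remainder, then a loop over range(chunk_num)
-- carrying (chunks, start_row), appending pixels[start_row:end_row] each step.
def chunk_image (pixels : List (List (List (String × Int)))) (chunk_num : Int) : List (List (List (List (String × Int)))) :=
  if chunk_num ≤ 0 then []   -- Python raises ValueError here; excluded by Pre_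
  else
    let total_rows : Int := pixels.length
    if total_rows = 0 then []
    else
      let base_rows_per_chunk := PySem.Int.floordiv total_rows chunk_num
      let remainder := PySem.Int.mod total_rows chunk_num
      ((PySem.List.pyRange 0 chunk_num 1).foldl
        (fun (st : List (List (List (List (String × Int)))) × Int) i =>
          let rows_in_this_chunk := base_rows_per_chunk + (if i < remainder then 1 else 0)
          let end_row := st.2 + rows_in_this_chunk
          (st.1 ++ [PySem.List.slice pixels (some st.2) (some end_row)], end_row))
        ([], 0)).1

-- ===== PORT B =====
-- literal transliteration of B's while loop over (rest, k): while k > 0, peel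
-- rest[:size] with size = -(-len(rest) // k) (ceiling division, as the Python writes it)
-- and continue on rest[size:] with k - 1; the appends to chunks form the result list.
def pvGoB (rest : List (List (List (String × Int)))) : Nat → List (List (List (List (String × Int))))
  | 0 => []
  | (k+1) =>
      let size : Int := -(PySem.Int.floordiv (-(rest.length : Int)) ((k : Int) + 1))
      [PySem.List.slice rest none (some size)] ++ pvGoB (PySem.List.slice rest (some size) none) k

def chunk_image_alt (pixels : List (List (List (String × Int)))) (chunk_num : Int) : List (List (List (List (String × Int)))) :=
  if chunk_num ≤ 0 then []   -- Python raises ValueError here; excluded by Pre_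
  else if pixels = [] then []
  else pvGoB pixels chunk_num.toNat

-- ===== PRECONDITION & SPEC =====
-- Pre_ excludes exactly chunk_num ≤ 0, on which Python A raises ValueError.
def Pre_chunk_image (pixels : List (List (List (String × Int)))) (chunk_num : Int) : Prop := 0 < chunk_num
instance (pixels : List (List (List (String × Int)))) (chunk_num : Int) : Decidable (Pre_chunk_image pixels chunk_num) := by unfold Pre_chunk_image; infer_instance

def pvWitness_chunk_image : (List (List (List (String × Int)))) × Int := ([[[("a", 1)]], [[("b", 2)]], [[("c", 3)]]], 2)

def Spec_chunk_image (pixels : List (List (List (String × Int)))) (chunk_num : Int) (out : List (List (List (List (String × Int))))) : Prop := out = chunk_image_alt pixels chunk_num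
instance (pixels : List (List (List (String × Int)))) (chunk_num : Int) (out : List (List (List (List (String × Int))))) : Decidable (Spec_chunk_image pixels chunk_num out) := by unfold Spec_chunk_image; infer_instance

-- ===== CLAIM (what is proved, stated in full; the proofs are below) =====
def Claim_equal_chunk_image : Prop := ∀ (pixels : List (List (List (String × Int)))) (chunk_num : Int), Dom_chunk_image pixels chunk_num → Pre_chunk_image pixels chunk_num → Spec_chunk_image pixels chunk_num (chunk_image pixels chunk_num)

-- ===== LEMMAS AND PROOFS =====

-- closed-form chunk boundary (Nat side): start of chunk i when n rows are split into k chunks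
def pvS (n k i : Nat) : Nat := i * (n / k) + min i (n % k)

theorem pv_min_step (j r : Int) : min (j + 1) r = min j r + (if j < r then 1 else 0) := by
  split_ifs with h <;> omega

-- Loop invariant for A: after the first j iterations A's state is
-- (the first j chunks in closed form, the closed-form start index j*base + min j rem).
theorem pv_fold_inv (pixels : List (List (List (String × Int)))) (base rem : Int) (hr : 0 ≤ rem) (j : Nat) :
    ((PySem.List.pyRange 0 (j : Int) 1).foldl
        (fun (st : List (List (List (List (String × Int)))) × Int) i =>
          (st.1 ++ [PySem.List.slice pixels (some st.2) (some (st.2 + (base + (if i < rem then 1 else 0))))],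
           st.2 + (base + (if i < rem then 1 else 0))))
        ([], 0))
    = ((PySem.List.pyRange 0 (j : Int) 1).map (fun i =>
        PySem.List.slice pixels (some (i * base + min i rem)) (some ((i + 1) * base + min (i + 1) rem))),
       (j : Int) * base + min (j : Int) rem) := by
  induction j with
  | zero => simp [PySem.List.pyRange_one_eq_nil, min_eq_left hr]
  | succ j ih =>
      have h0 : (0 : Int) ≤ (j : Int) := by positivity
      have hcast : ((j + 1 : Nat) : Int) = (j : Int) + 1 := by push_cast; ring
      rw [hcast, PySem.List.pyRange_one_succ_right h0, List.foldl_append, List.map_append, ih]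
      simp only [List.foldl_cons, List.foldl_nil, List.map_cons, List.map_nil]
      have key : (j : Int) * base + min (j : Int) rem + (base + (if (j : Int) < rem then 1 else 0))
          = ((j : Int) + 1) * base + min ((j : Int) + 1) rem := by
        rw [pv_min_step]; ring
      rw [key]

-- the ceiling-division first boundary equals pvS n k 1
theorem pv_ceil_eq (n k : Nat) (hk : 0 < k) :
    -(PySem.Int.floordiv (-(n : Int)) (k : Int)) = ((pvS n k 1 : Nat) : Int) := by
  rw [PySem.Int.neg_floordiv_neg_eq_iff_of_pos (by exact_mod_cast hk : (0 : Int) < (k : Int))]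
  have hcast : ((n / k : Nat) : Int) * (k : Int) = (n : Int) - ((n % k : Nat) : Int) := by
    have h2 : ((k : Int)) * ((n / k : Nat) : Int) + ((n % k : Nat) : Int) = (n : Int) := by
      exact_mod_cast Nat.div_add_mod n k
    linear_combination h2
  have hklt : (0 : Int) < (k : Int) := by exact_mod_cast hk
  rcases Nat.eq_zero_or_pos (n % k) with h | h
  · have hr : ((n % k : Nat) : Int) = 0 := by exact_mod_cast h
    have hq : ((pvS n k 1 : Nat) : Int) = ((n / k : Nat) : Int) := by
      unfold pvS; rw [h]; simp
    rw [hq]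
    constructor
    · nlinarith [hcast, hklt, hr]
    · nlinarith [hcast, hr]
  · have hr1 : (1 : Int) ≤ ((n % k : Nat) : Int) := by exact_mod_cast h
    have hrlt : ((n % k : Nat) : Int) < (k : Int) := by exact_mod_cast Nat.mod_lt n hk
    have hq : ((pvS n k 1 : Nat) : Int) = ((n / k : Nat) : Int) + 1 := by
      unfold pvS; rw [Nat.min_eq_left h]; push_cast; ring
    rw [hq]
    constructor
    · nlinarith [hcast, hr1]
    · nlinarith [hcast, hrlt]

-- self-similarity of the balanced partition: boundary j+1 of the (n,k)-partition is the
-- first-chunk size pvS n k 1 plus boundary j of the partition of the remaining rows into k-1.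
theorem pv_shift (n k j : Nat) (hk : 2 ≤ k) :
    pvS n k (j + 1) = pvS n k 1 + pvS (n - pvS n k 1) (k - 1) j := by
  have hkpos : 0 < k := by omega
  have hk1 : 0 < k - 1 := by omega
  have hdm : k * (n / k) + n % k = n := Nat.div_add_mod n k
  have hlt : n % k < k := Nat.mod_lt n hkpos
  have hbridge : (k - 1) * (n / k) = k * (n / k) - n / k := Nat.sub_one_mul k (n / k)
  have hsucc : (j + 1) * (n / k) = j * (n / k) + n / k := Nat.succ_mul j (n / k)
  have hge : n / k ≤ k * (n / k) := Nat.le_mul_of_pos_left _ hkpos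
  rcases Nat.eq_zero_or_pos (n % k) with h | h
  · -- n % k = 0: first chunk has n/k rows, the remaining (k-1)*(n/k) rows split evenly
    have hc : pvS n k 1 = n / k := by unfold pvS; omega
    have hm : n - pvS n k 1 = (k - 1) * (n / k) := by rw [hc]; omega
    rw [hm]
    have hdiv : (k - 1) * (n / k) / (k - 1) = n / k := Nat.mul_div_cancel_left _ hk1
    have hmod : (k - 1) * (n / k) % (k - 1) = 0 := Nat.mul_mod_right _ _
    unfold pvS
    rw [hdiv, hmod]
    omega
  · -- n % k > 0: first chunk has n/k + 1 rows; remainder drops by one, quotient is unchanged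
    have hc : pvS n k 1 = n / k + 1 := by unfold pvS; omega
    have hm : n - pvS n k 1 = (n % k - 1) + (k - 1) * (n / k) := by rw [hc]; omega
    rw [hm]
    have hr1 : n % k - 1 < k - 1 := by omega
    have hdiv : ((n % k - 1) + (k - 1) * (n / k)) / (k - 1) = n / k := by
      rw [Nat.add_mul_div_left _ _ hk1, Nat.div_eq_of_lt hr1]; omega
    have hmod : ((n % k - 1) + (k - 1) * (n / k)) % (k - 1) = n % k - 1 := by
      rw [Nat.add_mul_mod_self_left]; exact Nat.mod_eq_of_lt hr1
    unfold pvS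
    rw [hdiv, hmod]
    omega

-- B's recursion computes the closed-form partition
theorem pv_goB_eq (k : Nat) (hk : 1 ≤ k) : ∀ (xs : List (List (List (String × Int)))),
    pvGoB xs k = (List.range k).map (fun i =>
      (xs.drop (pvS xs.length k i)).take (pvS xs.length k (i + 1) - pvS xs.length k i)) := by
  induction k with
  | zero => omega
  | succ n ih =>
      cases n with
      | zero =>
          intro xs
          have hcast : (((0 : Nat) : Int) + 1) = ((1 : Nat) : Int) := by norm_num
          have hlen : pvS xs.length 1 1 = xs.length := by unfold pvS; omega
          simp only [pvGoB, hcast, pv_ceil_eq xs.length 1 (by omega), hlen,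
            PySem.List.slice_to_natCast]
          simp [pvS, List.range_succ]
      | succ m =>
          intro xs
          have hc' : -(PySem.Int.floordiv (-(xs.length : Int)) (((m + 1 : Nat) : Int) + 1))
              = ((pvS xs.length (m + 1 + 1) 1 : Nat) : Int) := by
            have h := pv_ceil_eq xs.length (m + 1 + 1) (by omega)
            have hcst : ((m + 1 + 1 : Nat) : Int) = ((m + 1 : Nat) : Int) + 1 := by push_cast; ring
            rw [hcst] at h
            exact h
          have hsize : pvGoB xs (m + 1 + 1) =
              [PySem.List.slice xs none (some (-(PySem.Int.floordiv (-(xs.length : Int)) (((m + 1 : Nat) : Int) + 1))))] ++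
                pvGoB (PySem.List.slice xs (some (-(PySem.Int.floordiv (-(xs.length : Int)) (((m + 1 : Nat) : Int) + 1)))) none) (m + 1) := rfl
          rw [hsize, hc', PySem.List.slice_to_natCast, PySem.List.slice_from_natCast, ih (by omega)]
          have hshift : ∀ j, pvS xs.length (m + 1 + 1) (j + 1)
              = pvS xs.length (m + 1 + 1) 1 + pvS (xs.length - pvS xs.length (m + 1 + 1) 1) (m + 1) j := by
            intro j
            have h := pv_shift xs.length (m + 1 + 1) j (by omega)
            simpa using h
          rw [List.range_succ_eq_map (n := m + 1), List.map_cons, List.map_map, List.singleton_append]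
          congr 1
          · simp [pvS]
          · apply List.map_congr_left
            intro i _
            simp only [Function.comp_apply, List.length_drop, Nat.succ_eq_add_one]
            have h1 := hshift i
            have h2 := hshift (i + 1)
            rw [List.drop_drop]
            congr 1
            · omega
            · congr 1
              omega

-- ===== VERDICT (by name: the statement is the Claim_ definition above) =====
theorem chunk_image_spec : Claim_equal_chunk_image := by
  intro pixels chunk_num _ hpre
  have hpos : 0 < chunk_num := hpre
  unfold Spec_chunk_image chunk_image chunk_image_alt
  have hneg : ¬ chunk_num ≤ 0 := not_le.mpr hpos
  simp only [hneg, if_false]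
  by_cases hz : pixels = []
  · simp [hz]
  · have hlz : ¬ (pixels.length : Int) = 0 := by
      intro h
      exact hz (List.length_eq_zero_iff.mp (by exact_mod_cast h))
    simp only [hz, hlz, if_false]
    obtain ⟨kN, hj⟩ : ∃ j : Nat, chunk_num = (j : Int) :=
      ⟨chunk_num.toNat, (Int.toNat_of_nonneg (le_of_lt hpos)).symm⟩
    subst hj
    have hkN : 1 ≤ kN := by exact_mod_cast hpos
    have hr : 0 ≤ PySem.Int.mod (pixels.length : Int) (kN : Int) :=
      PySem.Int.mod_nonneg _ (by exact_mod_cast hpos)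
    rw [pv_fold_inv _ _ _ hr, Int.toNat_natCast, pv_goB_eq kN hkN pixels,
      PySem.List.pyRange_one]
    simp only [sub_zero, Int.toNat_natCast, List.map_map]
    apply List.map_congr_left
    intro i _
    simp only [Function.comp_apply, zero_add]
    have hb : PySem.Int.floordiv (pixels.length : Int) (kN : Int) = ((pixels.length / kN : Nat) : Int) :=
      PySem.Int.floordiv_natCast _ _
    have hm : PySem.Int.mod (pixels.length : Int) (kN : Int) = ((pixels.length % kN : Nat) : Int) :=
      PySem.Int.mod_natCast _ _
    have h1 : (i : Int) * PySem.Int.floordiv (pixels.length : Int) (kN : Int) +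
        min (i : Int) (PySem.Int.mod (pixels.length : Int) (kN : Int)) = ((pvS pixels.length kN i : Nat) : Int) := by
      rw [hb, hm]; unfold pvS; push_cast; omega
    have h2 : ((i : Int) + 1) * PySem.Int.floordiv (pixels.length : Int) (kN : Int) +
        min ((i : Int) + 1) (PySem.Int.mod (pixels.length : Int) (kN : Int)) = ((pvS pixels.length kN (i + 1) : Nat) : Int) := by
      rw [hb, hm]; unfold pvS; push_cast; omega
    rw [h1, h2, PySem.List.slice_natCast]
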